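-- pv_equiv track=rewrite | github.com/shizifan/Analytica | tests/contract/_report_baseline.py | markdown_normalize
-- ===== SOURCE A (Python) =====
-- def markdown_normalize(md: str) -> str:
--     md = md.replace("\r\n", "\n").replace("\r", "\n")
--     out: list[str] = []
--     blank_run = 0
--     for raw_line in md.split("\n"):
--         line = raw_line.rstrip()
--         if not line:
--             blank_run += 1
--             if blank_run <= 2:
--                 out.append("")
--         else:
--             blank_run = 0
--             out.append(line)
--     return "\n".join(out).rstrip() + "\n"
-- ===== SOURCE B (Python) =====
-- import re
--
-- def markdown_normalize(md: str) -> str: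
--     md = md.replace("\r\n", "\n").replace("\r", "\n")
--     text = "\n".join(line.rstrip() for line in md.split("\n"))
--     # A run of k blank lines shows up as k+1 consecutive "\n" (k at the very
--     # start); prefixing one sentinel "\n" makes the leading run look internal,
--     # so a single regex caps every run at 3 newlines (= at most 2 blank lines).
--     collapsed = re.sub(r"\n{4,}", "\n\n\n", "\n" + text)
--     return collapsed[1:].rstrip() + "\n"
-- ===== Notes on version B (the rewrite author's own statement) =====
-- stated objective: simpler
-- what changed: Replaces A's stateful blank-run counter loop with a declarative pipeline: rstrip each line via a comprehension, join, and collapse every run of 4+ newlines to 3 with one regex (a sentinel leading newline makes the leading blank run an internal one).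
import Mathlib
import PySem

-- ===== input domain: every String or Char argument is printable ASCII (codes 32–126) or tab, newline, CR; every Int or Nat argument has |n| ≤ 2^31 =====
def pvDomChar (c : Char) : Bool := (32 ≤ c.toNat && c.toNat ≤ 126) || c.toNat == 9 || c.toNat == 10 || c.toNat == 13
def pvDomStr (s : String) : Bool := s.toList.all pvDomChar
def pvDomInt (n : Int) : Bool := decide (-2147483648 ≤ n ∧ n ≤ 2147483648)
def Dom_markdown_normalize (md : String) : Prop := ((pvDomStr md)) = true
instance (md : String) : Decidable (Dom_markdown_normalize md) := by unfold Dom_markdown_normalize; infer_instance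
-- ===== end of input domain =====

-- B replaces A's stateful blank-run counter by a declarative collapse: rstrip every
-- line, join, and cap every run of newlines at 3 with one regex (a sentinel newline
-- in front makes the leading run an internal one).  Objective: simpler/alternative.

-- ===== PORT A =====
-- the loop body of A: state = (out, blank_run)
def pvStepA (s : List (List Char) × Nat) (raw_line : List Char) : List (List Char) × Nat :=
  let line := PySem.Chars.rstrip raw_line
  if line.isEmpty then
    if s.2 + 1 ≤ 2 then (s.1 ++ [([] : List Char)], s.2 + 1) else (s.1, s.2 + 1)
  else (s.1 ++ [line], 0)

def markdown_normalize (md : String) : String :=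
  let md1 := PySem.Str.replace (PySem.Str.replace md "\r\n" "\n") "\r" "\n"
  let out := ((PySem.Chars.splitOn md1.toList ['\n']).foldl pvStepA ([], 0)).1
  String.ofList (PySem.Chars.rstrip (PySem.Chars.join ['\n'] out) ++ ['\n'])

-- ===== PORT B =====
-- hand port of re.sub(r"\n{4,}", "\n\n\n", ·) for this fixed pattern: every maximal
-- run of '\n' is capped at 3 ('k' counts the newlines of the current run seen so far)
def pvCapNl : List Char → Nat → List Char
  | [], _ => []
  | c :: rest, k =>
    if c = '\n' then (if k < 3 then '\n' :: pvCapNl rest (k + 1) else pvCapNl rest (k + 1))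
    else c :: pvCapNl rest 0

def markdown_normalize_alt (md : String) : String :=
  let md1 := PySem.Str.replace (PySem.Str.replace md "\r\n" "\n") "\r" "\n"
  let text := PySem.Chars.join ['\n']
      ((PySem.Chars.splitOn md1.toList ['\n']).map PySem.Chars.rstrip)
  let collapsed := pvCapNl ('\n' :: text) 0          -- re.sub on "\n" + text
  String.ofList (PySem.Chars.rstrip (PySem.List.slice collapsed (some 1) none) ++ ['\n'])

-- ===== PRECONDITION & SPEC =====
def Spec_markdown_normalize (md : String) (out : String) : Prop := out = markdown_normalize_alt md
instance (md : String) (out : String) : Decidable (Spec_markdown_normalize md out) := by unfold Spec_markdown_normalize; infer_instance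

-- ===== CLAIM (what is proved, stated in full; the proofs are below) =====
def Claim_equal_markdown_normalize : Prop := ∀ (md : String), Dom_markdown_normalize md → Spec_markdown_normalize md (markdown_normalize md)

-- ===== LEMMAS AND PROOFS =====

-- A's loop, as a structural recursion over the already-rstripped lines
def pvOutA : List (List Char) → Nat → List (List Char)
  | [], _ => []
  | l :: ls, b =>
    if l.isEmpty then (if b + 1 ≤ 2 then [] :: pvOutA ls (b + 1) else pvOutA ls (b + 1))
    else l :: pvOutA ls 0

-- '\n' glued before every line (= join with the separator also in front)
def pvF (ls : List (List Char)) : List Char := ls.flatMap (fun l => '\n' :: l)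

-- the number of newlines B has emitted beyond A after b blank lines of a run
def pvAB (b : Nat) : Nat := min b 3 - min b 2

theorem pv_fold_eq_outA (ls : List (List Char)) (acc : List (List Char)) (b : Nat) :
    (ls.foldl pvStepA (acc, b)).1 = acc ++ pvOutA (ls.map PySem.Chars.rstrip) b := by
  induction ls generalizing acc b with
  | nil => simp [pvOutA]
  | cons l ls ih =>
    rw [List.foldl_cons]
    by_cases h : (PySem.Chars.rstrip l).isEmpty
    · by_cases h2 : b + 1 ≤ 2
      · rw [show pvStepA (acc, b) l = (acc ++ [[]], b + 1) from by simp [pvStepA, h, h2], ih]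
        simp [pvOutA, h, h2]
      · rw [show pvStepA (acc, b) l = (acc, b + 1) from by simp [pvStepA, h, h2], ih]
        simp [pvOutA, h, h2]
    · rw [show pvStepA (acc, b) l = (acc ++ [PySem.Chars.rstrip l], 0) from by simp [pvStepA, h], ih]
      simp [pvOutA, h, List.append_assoc]

theorem pv_capNl_nonNl (c : Char) (hc : c ≠ '\n') (r : List Char) (k : Nat) :
    pvCapNl (c :: r) k = c :: pvCapNl r 0 := by
  simp [pvCapNl, hc]

theorem pv_capNl_line (l : List Char) (hl : '\n' ∉ l) (rest : List Char) (k : Nat) :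
    pvCapNl (l ++ rest) k = l ++ pvCapNl rest (if l.isEmpty then k else 0) := by
  induction l generalizing k with
  | nil => simp
  | cons c l ih =>
    have hc : c ≠ '\n' := by intro h; exact hl (h ▸ List.mem_cons_self)
    have hl' : '\n' ∉ l := fun h => hl (List.mem_cons_of_mem _ h)
    by_cases he : l.isEmpty
    · rw [List.isEmpty_iff] at he
      subst he; simp [pv_capNl_nonNl c hc]
    · simp [pv_capNl_nonNl c hc, ih hl', he]

theorem pv_F_cons (l : List Char) (ls : List (List Char)) :
    pvF (l :: ls) = '\n' :: PySem.Chars.join ['\n'] (l :: ls) := by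
  induction ls generalizing l with
  | nil => simp [pvF, PySem.Chars.join, List.intercalate]
  | cons m ls ih =>
    have h1 : pvF (l :: m :: ls) = '\n' :: l ++ pvF (m :: ls) := by simp [pvF]
    have h2 : PySem.Chars.join ['\n'] (l :: m :: ls)
        = l ++ '\n' :: PySem.Chars.join ['\n'] (m :: ls) := by
      simp [PySem.Chars.join, List.intercalate, List.intersperse]
    rw [h1, h2, ih m]; simp

-- rstrip characterizations
theorem pv_rstrip_cons (c : Char) (x : List Char) :
    PySem.Chars.rstrip (c :: x)
      = if PySem.Chars.rstrip x = [] then PySem.Chars.rstrip [c] else c :: PySem.Chars.rstrip x := by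
  simp only [PySem.Chars.rstrip, List.reverse_cons, List.dropWhile_append]
  by_cases h : (List.dropWhile PySem.Chars.isspace x.reverse).isEmpty
  · rw [List.isEmpty_iff] at h
    simp [h]
  · have h' : (List.dropWhile PySem.Chars.isspace x.reverse) ≠ [] := by
      simpa [List.isEmpty_iff] using h
    simp [h, h']

theorem pv_rstrip_cons_congr (c : Char) (x y : List Char)
    (h : PySem.Chars.rstrip x = PySem.Chars.rstrip y) :
    PySem.Chars.rstrip (c :: x) = PySem.Chars.rstrip (c :: y) := by
  rw [pv_rstrip_cons c x, pv_rstrip_cons c y, h]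

theorem pv_rstrip_append_congr (p x y : List Char)
    (h : PySem.Chars.rstrip x = PySem.Chars.rstrip y) :
    PySem.Chars.rstrip (p ++ x) = PySem.Chars.rstrip (p ++ y) := by
  induction p with
  | nil => simpa using h
  | cons c p ih => simpa using pv_rstrip_cons_congr c _ _ ih

theorem pv_rstrip_nl_cons (x : List Char) :
    PySem.Chars.rstrip ('\n' :: x)
      = if PySem.Chars.rstrip x = [] then [] else '\n' :: PySem.Chars.rstrip x := by
  rw [pv_rstrip_cons]
  have : PySem.Chars.rstrip ['\n'] = [] := by decide
  rw [this]

theorem pv_rstrip_nl_cancel (x y : List Char)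
    (h : PySem.Chars.rstrip ('\n' :: x) = PySem.Chars.rstrip ('\n' :: y)) :
    PySem.Chars.rstrip x = PySem.Chars.rstrip y := by
  rw [pv_rstrip_nl_cons, pv_rstrip_nl_cons] at h
  by_cases hx : PySem.Chars.rstrip x = [] <;> by_cases hy : PySem.Chars.rstrip y = [] <;>
    simp [hx, hy] at h <;> simp [hx, hy, h]

-- MAIN: A's capped line list and B's capped newline runs agree up to trailing whitespace,
-- for any run-in-progress state b (B is pvAB b newlines ahead of A inside a blank run).
theorem pv_rstrip_rep (k : Nat) : PySem.Chars.rstrip (List.replicate k '\n') = [] := by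
  induction k with
  | zero => rfl
  | succ k ih => rw [List.replicate_succ, pv_rstrip_nl_cons, ih]; simp

theorem pv_AB_of_le (b : Nat) (h : b ≤ 2) : pvAB b = 0 := by
  simp [pvAB]; omega

theorem pv_AB_of_ge (b : Nat) (h : 3 ≤ b) : pvAB b = 1 := by
  simp [pvAB]; omega

theorem pv_main (ls : List (List Char)) (b : Nat) (hls : ∀ l ∈ ls, '\n' ∉ l) :
    PySem.Chars.rstrip (pvF (pvOutA ls b))
      = PySem.Chars.rstrip (List.replicate (pvAB b) '\n' ++ pvCapNl (pvF ls) b) := by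
  induction ls generalizing b with
  | nil =>
    simp only [pvOutA, pvF, List.flatMap_nil]
    rw [show pvCapNl ([] : List Char) b = [] from rfl, List.append_nil, pv_rstrip_rep]; rfl
  | cons l ls ih =>
    have hl : '\n' ∉ l := hls l List.mem_cons_self
    have hls' : ∀ m ∈ ls, '\n' ∉ m := fun m hm => hls m (List.mem_cons_of_mem _ hm)
    have hFcons : pvF (l :: ls) = '\n' :: (l ++ pvF ls) := by simp [pvF]
    by_cases hE : l.isEmpty
    · rw [List.isEmpty_iff] at hE
      subst hE
      rw [hFcons, List.nil_append]
      by_cases hb3 : b < 3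
      · have hcap : pvCapNl ('\n' :: pvF ls) b = '\n' :: pvCapNl (pvF ls) (b + 1) := by
          simp [pvCapNl, hb3]
        rw [hcap]
        by_cases hb2 : b + 1 ≤ 2
        · -- blank kept by A, newline kept by B
          have h0 : pvAB b = 0 := pv_AB_of_le b (by omega)
          have h1 : pvAB (b + 1) = 0 := pv_AB_of_le (b + 1) (by omega)
          have hout : pvOutA ([] :: ls) b = [] :: pvOutA ls (b + 1) := by
            simp [pvOutA, hb2]
          rw [hout, h0, List.replicate_zero, List.nil_append]
          have : pvF ([] :: pvOutA ls (b + 1)) = '\n' :: pvF (pvOutA ls (b + 1)) := by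
            simp [pvF]
          rw [this]
          apply pv_rstrip_cons_congr
          have := ih (b + 1) hls'
          rwa [h1, List.replicate_zero, List.nil_append] at this
        · -- b = 2: blank dropped by A, newline kept by B; A will catch up (pvAB 3 = 1)
          have hb : b = 2 := by omega
          subst hb
          have hout : pvOutA ([] :: ls) 2 = pvOutA ls 3 := by simp [pvOutA]
          rw [hout, pv_AB_of_le 2 (by omega), List.replicate_zero, List.nil_append]
          have := ih 3 hls'
          rwa [pv_AB_of_ge 3 (by omega), List.replicate_one] at this
      · -- b ≥ 3: blank dropped by both
        have hcap : pvCapNl ('\n' :: pvF ls) b = pvCapNl (pvF ls) (b + 1) := by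
          simp [pvCapNl, hb3]
        have hout : pvOutA ([] :: ls) b = pvOutA ls (b + 1) := by
          simp [pvOutA]; omega
        rw [hcap, hout, pv_AB_of_ge b (by omega)]
        have := ih (b + 1) hls'
        rwa [pv_AB_of_ge (b + 1) (by omega)] at this
    · -- non-blank line: both emit exactly one separator + the line, and reset
      have hout : pvOutA (l :: ls) b = l :: pvOutA ls 0 := by simp [pvOutA, hE]
      rw [hout, hFcons]
      have hcap1 : pvCapNl ('\n' :: (l ++ pvF ls)) b
          = (if b < 3 then ['\n'] else []) ++ pvCapNl (l ++ pvF ls) (b + 1) := by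
        by_cases hb3 : b < 3 <;> simp [pvCapNl, hb3]
      have hcap2 : pvCapNl (l ++ pvF ls) (b + 1) = l ++ pvCapNl (pvF ls) 0 := by
        rw [pv_capNl_line l hl, if_neg (by simpa using hE)]
      have hglue : List.replicate (pvAB b) '\n' ++ ((if b < 3 then ['\n'] else []) : List Char)
          = ['\n'] := by
        by_cases hb3 : b < 3
        · rw [pv_AB_of_le b (by omega)]; simp [hb3]
        · rw [pv_AB_of_ge b (by omega)]; simp [hb3]
      rw [hcap1, hcap2, ← List.append_assoc, hglue]
      have hFout : pvF (l :: pvOutA ls 0) = '\n' :: (l ++ pvF (pvOutA ls 0)) := by simp [pvF]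
      rw [hFout]
      have := ih 0 hls'
      rw [pv_AB_of_le 0 (by omega), List.replicate_zero, List.nil_append] at this
      have hsc := pv_rstrip_append_congr ('\n' :: l) _ _ this
      simpa using hsc

theorem pv_splitOn_go (fuel : Nat) (l cur : List Char) (acc : List (List Char))
    (hf : l.length < fuel) (hcur : '\n' ∉ cur) (hacc : ∀ m ∈ acc, '\n' ∉ m) :
    PySem.Chars.splitOn.go ['\n'] fuel l cur acc ≠ [] ∧
      ∀ m ∈ PySem.Chars.splitOn.go ['\n'] fuel l cur acc, '\n' ∉ m := by
  induction fuel generalizing l cur acc with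
  | zero => omega
  | succ f ih =>
    cases l with
    | nil =>
      rw [show PySem.Chars.splitOn.go ['\n'] (f + 1) [] cur acc = (cur.reverse :: acc).reverse
        from rfl]
      constructor
      · simp
      · intro m hm
        rcases List.mem_cons.mp (List.mem_reverse.mp hm) with h | h
        · subst h; simpa using hcur
        · exact hacc m h
    | cons c rest =>
      rw [show PySem.Chars.splitOn.go ['\n'] (f + 1) (c :: rest) cur acc
          = if ['\n'].isPrefixOf (c :: rest)
            then PySem.Chars.splitOn.go ['\n'] f (List.drop 1 (c :: rest)) [] (cur.reverse :: acc)
            else PySem.Chars.splitOn.go ['\n'] f rest (c :: cur) acc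
        from rfl]
      by_cases hp : ['\n'].isPrefixOf (c :: rest)
      · rw [if_pos hp]
        apply ih rest [] (cur.reverse :: acc) (by simpa using Nat.lt_of_succ_lt_succ hf) (by simp)
        intro m hm
        rcases List.mem_cons.mp hm with h | h
        · subst h; simpa using hcur
        · exact hacc m h
      · rw [if_neg hp]
        have hc : c ≠ '\n' := by
          intro h
          exact hp (by simp [h, List.isPrefixOf])
        apply ih rest (c :: cur) acc (by simpa using Nat.lt_of_succ_lt_succ hf) ?_ hacc
        intro hm
        rcases List.mem_cons.mp hm with h | h
        · exact hc h.symm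
        · exact hcur h

theorem pv_splitOn_props (s : List Char) :
    PySem.Chars.splitOn s ['\n'] ≠ [] ∧ ∀ m ∈ PySem.Chars.splitOn s ['\n'], '\n' ∉ m := by
  exact pv_splitOn_go (s.length + 1) s [] [] (by omega) (by simp) (by simp)

theorem pv_rstrip_no_nl (l : List Char) (h : '\n' ∉ l) : '\n' ∉ PySem.Chars.rstrip l := by
  intro hm
  simp only [PySem.Chars.rstrip, List.mem_reverse] at hm
  exact h (by simpa using (List.dropWhile_sublist (p := PySem.Chars.isspace) (l := l.reverse)).mem hm)

theorem pv_outA_ne_nil (l : List Char) (ls : List (List Char)) : pvOutA (l :: ls) 0 ≠ [] := by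
  by_cases h : l.isEmpty <;> simp [pvOutA, h]

-- ===== VERDICT (by name: the statement is the Claim_ definition above) =====
theorem markdown_normalize_spec : Claim_equal_markdown_normalize := by
  intro md _
  unfold Spec_markdown_normalize markdown_normalize markdown_normalize_alt
  apply congrArg (fun x => String.ofList (x ++ ['\n']))
  set md1 := PySem.Str.replace (PySem.Str.replace md "\r\n" "\n") "\r" "\n" with hmd1
  set L := PySem.Chars.splitOn md1.toList ['\n'] with hL
  obtain ⟨hne, hnl⟩ := pv_splitOn_props md1.toList
  rw [← hL] at hne hnl
  set Lr := L.map PySem.Chars.rstrip with hLr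
  have hnlr : ∀ l ∈ Lr, '\n' ∉ l := by
    intro l hl
    rw [hLr] at hl
    obtain ⟨m, hm, rfl⟩ := List.mem_map.mp hl
    exact pv_rstrip_no_nl m (hnl m hm)
  -- rewrite A's fold
  rw [pv_fold_eq_outA, List.nil_append, ← hLr]
  -- rewrite B's slice
  have hslice : ∀ x : List Char, PySem.List.slice (pvCapNl ('\n' :: x) 0) (some 1) none
      = pvCapNl x 1 := by
    intro x
    have : pvCapNl ('\n' :: x) 0 = '\n' :: pvCapNl x 1 := by simp [pvCapNl]
    rw [this]
    simp [PySem.List.slice]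
  rw [hslice]
  -- structure of L
  obtain ⟨l0, ls0, hcons⟩ : ∃ l0 ls0, Lr = l0 :: ls0 := by
    cases h : Lr with
    | nil => exact absurd (by simpa [hLr, List.map_eq_nil_iff] using h) hne
    | cons a as => exact ⟨a, as, rfl⟩
  have hmain := pv_main Lr 0 hnlr
  rw [hcons] at hmain ⊢
  obtain ⟨o0, os0, hocons⟩ : ∃ o0 os0, pvOutA (l0 :: ls0) 0 = o0 :: os0 := by
    cases h : pvOutA (l0 :: ls0) 0 with
    | nil => exact absurd h (pv_outA_ne_nil l0 ls0)
    | cons a as => exact ⟨a, as, rfl⟩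
  rw [hocons, pv_F_cons] at hmain
  rw [pv_F_cons] at hmain
  simp only [pvAB] at hmain
  have : pvCapNl ('\n' :: PySem.Chars.join ['\n'] (l0 :: ls0)) 0
      = '\n' :: pvCapNl (PySem.Chars.join ['\n'] (l0 :: ls0)) 1 := by simp [pvCapNl]
  rw [this] at hmain
  have := pv_rstrip_nl_cancel _ _ hmain
  rw [hocons]
  exact this
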